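-- pv_equiv track=rewrite | github.com/ConnorHardyCoding/Hangmon-Pokemon-Hangman- | Hangmon.py | create_hangword_with_dashes
-- ===== SOURCE A (Python) =====
-- def create_hangword_with_dashes(chosen_word: str):
--     index_count = 0
--     hangword = "-" * len(chosen_word)
--     for item in chosen_word:
--         if item == " ":
--             listhangword = list(hangword)
--             listhangword[index_count] = chosen_word[index_count]
--
--             hangword = ''.join(listhangword)
--         index_count+=1
--     return hangword
-- ===== SOURCE B (Python) =====
-- def create_hangword_with_dashes(chosen_word: str):
--     return ' '.join('-' * len(part) for part in chosen_word.split(' '))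
-- ===== Notes on version B (the rewrite author's own statement) =====
-- stated objective: faster
-- what changed: Replaces the character-by-character loop that rebuilds the whole string via list() plus join at every space with a single tokenize-map-rejoin: split on the space separator, map each part to a dash-run of its length, rejoin with the separator.
import Mathlib
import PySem

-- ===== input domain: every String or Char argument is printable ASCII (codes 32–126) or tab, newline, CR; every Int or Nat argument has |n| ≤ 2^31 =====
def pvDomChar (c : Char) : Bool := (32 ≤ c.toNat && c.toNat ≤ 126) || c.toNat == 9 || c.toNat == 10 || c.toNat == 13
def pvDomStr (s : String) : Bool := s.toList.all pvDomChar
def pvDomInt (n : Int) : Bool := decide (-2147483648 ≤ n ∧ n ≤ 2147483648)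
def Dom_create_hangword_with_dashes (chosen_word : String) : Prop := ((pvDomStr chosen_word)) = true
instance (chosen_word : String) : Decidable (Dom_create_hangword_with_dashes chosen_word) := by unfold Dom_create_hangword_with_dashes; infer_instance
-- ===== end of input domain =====

-- B replaces A's char-by-char loop (which rebuilds the whole string at each space) by a
-- split-on-space / map-to-dash-runs / rejoin: an idiomatic tokenize-map-rejoin decomposition.


-- ===== PORT A =====
-- index_count is the position of `item` in the loop, so it is always a valid
-- nonnegative index into both strings; the list assignment is List.set, the read is getD.
def create_hangword_with_dashes (chosen_word : String) : String :=
  let cs := chosen_word.toList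
  let st := cs.foldl (fun (st : Nat × List Char) item =>
      if item == ' ' then
        (st.1 + 1, st.2.set st.1 (cs.getD st.1 ' '))
      else (st.1 + 1, st.2))
    (0, List.replicate cs.length '-')
  String.ofList st.2

-- ===== PORT B =====
def create_hangword_with_dashes_alt (chosen_word : String) : String :=
  PySem.Str.join " "
    ((PySem.Chars.splitOn chosen_word.toList " ".toList).map
      (fun part => String.ofList (List.replicate part.length '-')))

-- ===== PRECONDITION & SPEC =====
def Spec_create_hangword_with_dashes (chosen_word : String) (out : String) : Prop := out = create_hangword_with_dashes_alt chosen_word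
instance (chosen_word : String) (out : String) : Decidable (Spec_create_hangword_with_dashes chosen_word out) := by unfold Spec_create_hangword_with_dashes; infer_instance

-- ===== CLAIM (what is proved, stated in full; the proofs are below) =====
def Claim_equal_create_hangword_with_dashes : Prop := ∀ (chosen_word : String), Dom_create_hangword_with_dashes chosen_word → Spec_create_hangword_with_dashes chosen_word (create_hangword_with_dashes chosen_word)

-- ===== LEMMAS AND PROOFS =====

-- mask of one character: spaces stay, everything else becomes a dash
def pvMask (c : Char) : Char := if c == ' ' then ' ' else '-'

-- functional form of splitting on a single space
def pvSpl (cur : List Char) : List Char → List (List Char)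
  | [] => [cur.reverse]
  | c :: rest => if c == ' ' then cur.reverse :: pvSpl [] rest else pvSpl (c :: cur) rest

theorem pvSpl_ne_nil (cur l : List Char) : pvSpl cur l ≠ [] := by
  induction l generalizing cur with
  | nil => simp [pvSpl]
  | cons c rest ih => simp only [pvSpl]; split <;> simp [ih]

theorem pvGo_space (fuel : Nat) : ∀ (l cur : List Char) (acc : List (List Char)), l.length < fuel →
    PySem.Chars.splitOn.go [' '] fuel l cur acc = acc.reverse ++ pvSpl cur l := by
  induction fuel with
  | zero => intro l cur acc h; omega
  | succ n ih =>
    intro l cur acc h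
    cases l with
    | nil => rw [PySem.Chars.splitOn.go.eq_def]; simp [pvSpl]
    | cons c rest =>
      rw [PySem.Chars.splitOn.go.eq_def]
      by_cases hc : c = ' '
      · subst hc
        have hp : List.isPrefixOf [' '] (' ' :: rest) = true := by
          simp [List.isPrefixOf]
        simp only [hp, if_pos]
        rw [ih _ _ _ (by simp at h ⊢; omega)]
        simp [pvSpl]
      · have hp : List.isPrefixOf [' '] (c :: rest) = false := by
          simp [List.isPrefixOf]; exact fun hh => (hc hh.symm).elim
        simp only [hp, Bool.false_eq_true, if_false]
        rw [ih _ _ _ (by simp at h ⊢; omega)]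
        simp [pvSpl, hc]

-- joining the dash-runs of the split pieces is exactly the per-character mask
theorem pvJoin_spl (l : List Char) : ∀ (cur : List Char),
    PySem.Chars.join [' ']
      ((pvSpl cur l).map (fun p => List.replicate p.length '-'))
      = List.replicate cur.length '-' ++ l.map pvMask := by
  induction l with
  | nil => intro cur; simp [pvSpl, PySem.Chars.join, List.intercalate]
  | cons c rest ih =>
    intro cur
    by_cases hc : c = ' '
    · subst hc
      simp only [pvSpl, BEq.rfl, if_pos, List.map_cons]
      have hne : ((pvSpl [] rest).map (fun p => List.replicate p.length '-')) ≠ [] := by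
        simp [pvSpl_ne_nil]
      obtain ⟨x, xs, hx⟩ := List.exists_cons_of_ne_nil hne
      rw [hx]
      have := ih []
      rw [hx] at this
      simp only [PySem.Chars.join, List.intercalate] at this ⊢
      simp only [List.intersperse_cons₂, List.flatten_cons] at this ⊢
      simp [this, pvMask]
    · have h1 : pvSpl cur (c :: rest) = pvSpl (c :: cur) rest := by
        simp [pvSpl, hc]
      rw [h1, ih (c :: cur)]
      rw [List.length_cons, List.replicate_succ']
      simp [pvMask, hc]

-- invariant of A's fold: after consuming `done`, the buffer is `done` masked
-- followed by untouched dashes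
theorem pvFoldA (cs : List Char) : ∀ (l done : List Char), cs = done ++ l →
    l.foldl (fun (st : Nat × List Char) item =>
        if item == ' ' then
          (st.1 + 1, st.2.set st.1 (cs.getD st.1 ' '))
        else (st.1 + 1, st.2))
      (done.length, done.map pvMask ++ List.replicate l.length '-')
      = (cs.length, cs.map pvMask) := by
  intro l
  induction l with
  | nil => intro done h; subst h; simp
  | cons c rest ih =>
    intro done h
    rw [List.foldl_cons]
    by_cases hc : c = ' '
    · subst hc
      rw [if_pos (by simp)]
      have hget : cs.getD done.length ' ' = ' ' := by
        subst h; simp [List.getD_eq_getElem?_getD]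
      have hset : (List.map pvMask done ++ '-' :: List.replicate rest.length '-').set done.length ' '
          = List.map pvMask (done ++ [' ']) ++ List.replicate rest.length '-' := by
        rw [List.set_append_right _ _ (by simp)]
        simp [pvMask]
      simp only [List.length_cons, List.replicate_succ, hget, hset]
      simpa using ih (done ++ [' ']) (by simp [h])
    · rw [if_neg (by simp [hc])]
      have := ih (done ++ [c]) (by simp [h])
      simpa [pvMask, hc, List.replicate_succ] using this

theorem pvA_eq (chosen_word : String) :
    create_hangword_with_dashes chosen_word = String.ofList (chosen_word.toList.map pvMask) := by
  have h0 := pvFoldA chosen_word.toList chosen_word.toList [] (by simp)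
  simp only [List.length_nil, List.map_nil, List.nil_append] at h0
  unfold create_hangword_with_dashes
  simp only [h0]

theorem pvB_eq (chosen_word : String) :
    create_hangword_with_dashes_alt chosen_word = String.ofList (chosen_word.toList.map pvMask) := by
  unfold create_hangword_with_dashes_alt
  apply String.toList_inj.mp
  rw [PySem.Str.toList_join]
  have hsep : (" " : String).toList = [' '] := rfl
  rw [hsep]
  have hsplit : PySem.Chars.splitOn chosen_word.toList [' '] = pvSpl [] chosen_word.toList := by
    unfold PySem.Chars.splitOn
    rw [pvGo_space _ _ _ _ (by omega)]
    simp
  rw [hsplit]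
  have := pvJoin_spl chosen_word.toList []
  simp only [List.length_nil, List.replicate_zero, List.nil_append] at this
  simp only [List.map_map]
  have hmaps : (pvSpl [] chosen_word.toList).map (String.toList ∘ fun part => String.ofList (List.replicate part.length '-'))
      = (pvSpl [] chosen_word.toList).map (fun p => List.replicate p.length '-') := by
    apply List.map_congr_left; intro p _; simp
  rw [hmaps]
  simpa using this

-- ===== VERDICT (by name: the statement is the Claim_ definition above) =====
theorem create_hangword_with_dashes_spec : Claim_equal_create_hangword_with_dashes := by
  intro chosen_word _
  unfold Spec_create_hangword_with_dashes
  rw [pvA_eq, pvB_eq]
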